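-- pv_equiv track=rewrite | github.com/misespuneraul/text-predictor | TextGen.py | create_seq
-- ===== SOURCE A (Python) =====
-- def is_punctuation(input):
--     if input in ",.?;:\()!'" or input == '"':
--         return 1
--     return 0
--
-- def create_seq(words, k=3):
--     seqs = []
--     for i in range(len(words) + 1 - k):
--         seq = words[i]
--         for j in range(1, k):
--             if is_punctuation(words[i + j]):
--                 seq = seq + words[i + j]
--             else:
--                 seq = seq + ' ' + words[i + j]
--         seqs.append(seq)
--     return seqs
-- ===== SOURCE B (Python) =====
-- def is_punctuation(input):
--     if input in ",.?;:\()!'" or input == '"':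
--         return 1
--     return 0
--
-- def create_seq(words, k=3):
--     # Build the whole punctuation-spaced text once, remembering where each
--     # word's piece starts; every window is then a direct substring of it.
--     parts = []
--     offsets = [0]
--     pos = 0
--     for w in words:
--         piece = w if is_punctuation(w) else ' ' + w
--         parts.append(piece)
--         pos += len(piece)
--         offsets.append(pos)
--     text = ''.join(parts)
--     return [words[i] + text[offsets[i + 1]:offsets[i + k]]
--             for i in range(len(words) + 1 - k)]
-- ===== Notes on version B (the rewrite author's own statement) =====
-- stated objective: faster
-- what changed: B builds the whole punctuation-spaced text once with a table of piece start offsets and extracts each window as one substring text[offsets[i+1]:offsets[i+k]], replacing A's nested per-window repeated string concatenation.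
import Mathlib
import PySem

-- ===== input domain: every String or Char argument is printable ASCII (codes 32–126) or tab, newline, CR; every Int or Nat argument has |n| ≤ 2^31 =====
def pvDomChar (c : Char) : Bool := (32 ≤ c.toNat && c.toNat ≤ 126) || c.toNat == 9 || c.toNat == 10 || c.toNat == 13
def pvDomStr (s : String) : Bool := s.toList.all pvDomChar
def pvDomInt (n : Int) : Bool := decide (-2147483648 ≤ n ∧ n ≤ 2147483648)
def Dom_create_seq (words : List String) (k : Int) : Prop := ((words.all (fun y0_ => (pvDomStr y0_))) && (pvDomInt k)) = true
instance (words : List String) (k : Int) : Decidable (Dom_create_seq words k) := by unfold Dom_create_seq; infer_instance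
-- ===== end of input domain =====

-- B builds the whole punctuation-spaced text once with a table of piece start
-- offsets and extracts each window as one substring (alternative algorithm).


-- ===== PORT A =====
-- 'input in ",.?;:\()!'"' is Python's substring test; the literal keeps the backslash
def is_punctuation (inp : String) : Int :=
  if PySem.Str.isIn inp ",.?;:\\()!'" || inp == "\"" then 1 else 0

def create_seq (words : List String) (k : Int) : List String :=
  (PySem.List.pyRange 0 ((words.length : Int) + 1 - k) 1).foldl
    (fun seqs i =>
      let seq :=
        (PySem.List.pyRange 1 k 1).foldl
          (fun seq j =>
            if is_punctuation (PySem.List.pyGetD words (i + j) "") ≠ 0 then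
              seq ++ PySem.List.pyGetD words (i + j) ""
            else
              seq ++ " " ++ PySem.List.pyGetD words (i + j) "")
          (PySem.List.pyGetD words i "")
      seqs ++ [seq]) []

-- ===== PORT B =====
-- one pass: collect pieces, running position, and the offsets table
def create_seq_alt (words : List String) (k : Int) : List String :=
  let st := words.foldl
    (fun (st : List String × List Int × Int) w =>
      let piece := if is_punctuation w ≠ 0 then w else " " ++ w
      (st.1 ++ [piece], st.2.1 ++ [st.2.2 + PySem.Str.len piece],
       st.2.2 + PySem.Str.len piece))
    ([], [0], 0)
  let text := PySem.Str.join "" st.1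
  (PySem.List.pyRange 0 ((words.length : Int) + 1 - k) 1).map
    (fun i =>
      PySem.List.pyGetD words i "" ++
        PySem.Str.slice text (some (PySem.List.pyGetD st.2.1 (i + 1) 0))
          (some (PySem.List.pyGetD st.2.1 (i + k) 0)))

-- ===== PRECONDITION & SPEC =====
-- Pre_ excludes only k ≤ 0, on which Python A raises IndexError (words[i] at i = len(words)).
def Pre_create_seq (words : List String) (k : Int) : Prop := 1 ≤ k
instance (words : List String) (k : Int) : Decidable (Pre_create_seq words k) := by
  unfold Pre_create_seq; infer_instance
def pvWitness_create_seq : List String × Int := (["hi", ",", "ok"], 2)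

def Spec_create_seq (words : List String) (k : Int) (out : List String) : Prop := out = create_seq_alt words k
instance (words : List String) (k : Int) (out : List String) : Decidable (Spec_create_seq words k out) := by unfold Spec_create_seq; infer_instance

-- ===== CLAIM (what is proved, stated in full; the proofs are below) =====
def Claim_equal_create_seq : Prop := ∀ (words : List String) (k : Int), Dom_create_seq words k → Pre_create_seq words k → Spec_create_seq words k (create_seq words k)

-- ===== LEMMAS AND PROOFS =====

theorem str_join_empty_nil : PySem.Str.join "" ([] : List String) = "" := by
  apply String.toList_inj.mp
  simp [PySem.Str.toList_join, PySem.Chars.join_nil]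

theorem str_join_empty_cons (p : String) (rest : List String) :
    PySem.Str.join "" (p :: rest) = p ++ PySem.Str.join "" rest := by
  apply String.toList_inj.mp
  cases rest with
  | nil =>
      simp [PySem.Str.toList_join, PySem.Chars.join_singleton, PySem.Chars.join_nil]
  | cons q r =>
      simp [PySem.Str.toList_join, PySem.Chars.join_cons_cons]

-- the piece a window step appends for the word at an index
def pvPiece (w : String) : String := if is_punctuation w ≠ 0 then w else " " ++ w

theorem slice_cons (words : List String) (a b : Int) (h0 : 0 ≤ a) (hab : a < b)
    (hb : a < (words.length : Int)) :
    PySem.List.slice (words.map pvPiece) (some a) (some b)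
      = pvPiece (PySem.List.pyGetD words a "")
          :: PySem.List.slice (words.map pvPiece) (some (a + 1)) (some b) := by
  rw [PySem.List.slice_toNat _ h0 (by omega), PySem.List.slice_toNat _ (by omega) (by omega)]
  have hlt : a.toNat < (words.map pvPiece).length := by
    simp only [List.length_map]; omega
  rw [List.drop_eq_getElem_cons hlt]
  have h1 : (a + 1).toNat = a.toNat + 1 := by omega
  have h2 : b.toNat - a.toNat = (b.toNat - (a + 1).toNat) + 1 := by omega
  rw [h2, List.take_succ_cons, h1]
  congr 1
  rw [PySem.List.pyGetD_eq_getElem words "" h0 hb]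
  simp

theorem inner_fold_eq (words : List String) (k i : Int) (h0 : 0 ≤ i)
    (hik : i + k ≤ (words.length : Int)) :
    ∀ (m : Nat) (a : Int) (s : String), k - a = (m : Int) → 1 ≤ a →
      (PySem.List.pyRange a k 1).foldl
        (fun seq j =>
          if is_punctuation (PySem.List.pyGetD words (i + j) "") ≠ 0 then
            seq ++ PySem.List.pyGetD words (i + j) ""
          else
            seq ++ " " ++ PySem.List.pyGetD words (i + j) "") s
      = s ++ PySem.Str.join ""
          (PySem.List.slice (words.map pvPiece) (some (i + a)) (some (i + k))) := by
  intro m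
  induction m with
  | zero =>
      intro a s hm ha
      have hak : a = k := by omega
      rw [hak, PySem.List.pyRange_one_eq_nil (le_refl k)]
      rw [PySem.List.slice_toNat _ (by omega) (by omega)]
      simp [str_join_empty_nil]
  | succ m ih =>
      intro a s hm ha
      have hak : a < k := by omega
      rw [PySem.List.pyRange_one_cons hak]
      simp only [List.foldl_cons]
      rw [ih (a + 1) _ (by omega) (by omega)]
      rw [slice_cons words (i + a) (i + k) (by omega) (by omega) (by omega)]
      rw [str_join_empty_cons]
      have : i + a + 1 = i + (a + 1) := by ring
      rw [this]
      unfold pvPiece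
      split_ifs with h
      · rw [String.append_assoc]
      · simp [String.append_assoc]

-- ----- B-side: characterising the fold state and the substring extraction -----

-- total character length of the pieces of a word list
def pvOffLen (ws : List String) : Nat := (ws.map (fun w => (pvPiece w).toList.length)).sum

theorem pvOffLen_nil : pvOffLen [] = 0 := rfl
theorem pvOffLen_cons (w : String) (t : List String) :
    pvOffLen (w :: t) = (pvPiece w).toList.length + pvOffLen t := by
  simp [pvOffLen]

-- the fold of B, characterised
theorem fold_eq (ws : List String) :
    ∀ (ps : List String) (offs : List Int) (pos : Int),
      ws.foldl
        (fun (st : List String × List Int × Int) w =>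
          let piece := if is_punctuation w ≠ 0 then w else " " ++ w
          (st.1 ++ [piece], st.2.1 ++ [st.2.2 + PySem.Str.len piece],
           st.2.2 + PySem.Str.len piece))
        (ps, offs, pos)
      = (ps ++ ws.map pvPiece,
         offs ++ (List.range ws.length).map
           (fun j => pos + (pvOffLen (ws.take (j + 1)) : Int)),
         pos + (pvOffLen ws : Int)) := by
  induction ws with
  | nil => intro ps offs pos; simp [pvOffLen_nil]
  | cons w t ih =>
      intro ps offs pos
      simp only [List.foldl_cons]
      rw [ih]
      refine Prod.ext ?_ (Prod.ext ?_ ?_)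
      · simp [pvPiece]
      · simp only [List.length_cons, List.range_succ_eq_map, List.map_cons, List.map_map]
        simp only [List.append_assoc, List.singleton_append]
        refine congrArg (offs ++ ·) ?_
        refine congrArg₂ List.cons ?_ ?_
        · simp [pvPiece, PySem.Str.len_eq, pvOffLen_cons, pvOffLen_nil]
        · apply List.map_congr_left
          intro j hj
          simp only [Function.comp, List.take_succ_cons, pvOffLen_cons, pvPiece,
            PySem.Str.len_eq]
          push_cast
          ring
      · simp [pvOffLen_cons, pvPiece, PySem.Str.len_eq]
        ring

-- the offsets table reads back the prefix length
theorem offsets_get (words : List String) (m : Int) (h0 : 0 ≤ m)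
    (hm : m ≤ (words.length : Int)) :
    PySem.List.pyGetD
      ([0] ++ (List.range words.length).map
        (fun j => (0 : Int) + (pvOffLen (words.take (j + 1)) : Int))) m 0
      = (pvOffLen (words.take m.toNat) : Int) := by
  have hlen : m < (([0] ++ (List.range words.length).map
      (fun j => (0 : Int) + (pvOffLen (words.take (j + 1)) : Int))).length : Int) := by
    simp only [List.length_append, List.length_map, List.length_range, List.length_cons,
      List.length_nil]
    push_cast; omega
  rw [PySem.List.pyGetD_eq_getElem _ 0 h0 hlen]
  rcases Nat.eq_zero_or_pos m.toNat with h | h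
  · simp [h, pvOffLen_nil]
  · have hlt : m.toNat - 1 < words.length := by omega
    have : m.toNat = (m.toNat - 1) + 1 := by omega
    rw [List.getElem_append_right (by simp; omega)]
    simp only [List.length_cons, List.length_nil, List.getElem_map, List.getElem_range]
    rw [show m.toNat - 1 + 1 = m.toNat from by omega]
    omega

-- join with empty separator is flatten (on char lists)
theorem join_nil_eq_flatten (Ls : List (List Char)) :
    PySem.Chars.join [] Ls = Ls.flatten := by
  induction Ls with
  | nil => simp [PySem.Chars.join_nil]
  | cons p rest ih =>
      cases rest with
      | nil => simp [PySem.Chars.join_singleton]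
      | cons q r =>
          rw [PySem.Chars.join_cons_cons]
          simp [ih]

-- the char-level substring-of-flatten lemma
theorem flatten_drop_take (Ls : List (List Char)) (a b : Nat) (hab : a ≤ b)
    (hb : b ≤ Ls.length) :
    ((Ls.flatten.drop (Ls.take a).flatten.length).take
        ((Ls.take b).flatten.length - (Ls.take a).flatten.length))
      = ((Ls.drop a).take (b - a)).flatten := by
  have hdrop : Ls.flatten.drop (Ls.take a).flatten.length = (Ls.drop a).flatten := by
    rw [show Ls.flatten = (Ls.take a).flatten ++ (Ls.drop a).flatten from by
        rw [← List.flatten_append, List.take_append_drop]]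
    exact List.drop_left
  rw [hdrop]
  have hb' : Ls.take b = Ls.take a ++ (Ls.drop a).take (b - a) := by
    rw [← List.take_append_drop a (Ls.take b), List.take_take,
      Nat.min_eq_left hab, List.drop_take]
  have hlen : (Ls.take b).flatten.length - (Ls.take a).flatten.length
      = ((Ls.drop a).take (b - a)).flatten.length := by
    rw [hb', List.flatten_append, List.length_append]
    omega
  rw [hlen]
  have : (Ls.drop a).flatten
      = ((Ls.drop a).take (b - a)).flatten ++ ((Ls.drop a).drop (b - a)).flatten := by
    rw [← List.flatten_append, List.take_append_drop]
  rw [this, List.take_left]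

-- substring of the joined text = join of the sliced pieces
theorem slice_text_eq (words : List String) (a b : Int) (h0 : 0 ≤ a) (hab : a ≤ b)
    (hb : b ≤ (words.length : Int)) :
    PySem.Str.slice (PySem.Str.join "" (words.map pvPiece))
        (some ((pvOffLen (words.take a.toNat) : Nat) : Int))
        (some ((pvOffLen (words.take b.toNat) : Nat) : Int))
      = PySem.Str.join "" (PySem.List.slice (words.map pvPiece) (some a) (some b)) := by
  apply String.toList_inj.mp
  rw [PySem.Str.toList_slice, PySem.Str.toList_join, PySem.Str.toList_join]
  simp only [PySem.Chars.slice_eq_listSlice]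
  have hemp : ("" : String).toList = [] := rfl
  rw [hemp, join_nil_eq_flatten, join_nil_eq_flatten]
  set Ls := (words.map pvPiece).map String.toList with hLs
  have hlenLs : Ls.length = words.length := by simp [hLs]
  have hOff : ∀ (m : Nat), m ≤ words.length →
      pvOffLen (words.take m) = (Ls.take m).flatten.length := by
    intro m _
    simp [hLs, pvOffLen, ← List.map_take, List.length_flatten, Function.comp_def]
  rw [PySem.List.slice_natCast, PySem.List.slice_toNat _ h0 (by omega)]
  rw [hOff a.toNat (by omega), hOff b.toNat (by omega)]
  rw [flatten_drop_take Ls a.toNat b.toNat (by omega) (by omega)]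
  rw [← List.map_drop, ← List.map_take]

-- ===== VERDICT (by name: the statement is the Claim_ definition above) =====
theorem create_seq_spec : Claim_equal_create_seq := by
  intro words k _ hk
  have hk1 : 1 ≤ k := hk
  unfold Spec_create_seq create_seq create_seq_alt
  rw [fold_eq words [] [0] 0]
  simp only [List.nil_append]
  rw [PySem.List.foldl_append_singleton_eq_map
        (fun i =>
          (PySem.List.pyRange 1 k 1).foldl
            (fun seq j =>
              if is_punctuation (PySem.List.pyGetD words (i + j) "") ≠ 0 then
                seq ++ PySem.List.pyGetD words (i + j) ""
              else
                seq ++ " " ++ PySem.List.pyGetD words (i + j) "")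
            (PySem.List.pyGetD words i "")) _ []]
  simp only [List.nil_append]
  apply List.map_congr_left
  intro i hi
  have hmem := PySem.List.mem_pyRange_one.mp hi
  have hik : i + k ≤ (words.length : Int) := by omega
  have hA := inner_fold_eq words k i (by omega) hik (k - 1).toNat 1
          (PySem.List.pyGetD words i "") (by omega) (by omega)
  rw [hA]
  have h1 := offsets_get words (i + 1) (by omega) (by omega)
  have h2 := offsets_get words (i + k) (by omega) (by omega)
  simp only [List.singleton_append] at h1 h2 ⊢
  rw [h1, h2]
  rw [slice_text_eq words (i + 1) (i + k) (by omega) (by omega) (by omega)]
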